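-- pv_equiv track=rewrite | github.com/khan5v/kalibra | src/kalibra/loaders/_utils.py | _find_root_span
-- ===== SOURCE A (Python) =====
-- def _find_root_span(spans: list[dict]) -> dict | None:
--     """Find the root span (no parent_id) from a list of spans in one trace.
--
--     If multiple roots exist, picks the one with the earliest start_time.
--     Spans missing start_time are deprioritized (not chosen over spans with timestamps).
--     """
--     root = None
--     for s in spans:
--         pid = s.get("parent_id")
--         if pid is None or pid == "":
--             if root is None:
--                 root = s
--             else:
--                 s_time = s.get("start_time") or ""
--                 root_time = root.get("start_time") or ""
--                 # Only prefer s over root if s has a real timestamp that's earlier,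
--                 # or if root has no timestamp but s does.
--                 if s_time and (not root_time or s_time < root_time):
--                     root = s
--     return root
-- ===== SOURCE B (Python) =====
-- def _find_root_span(spans: list[dict]) -> dict | None:
--     """Sort-based: stable-sort the root spans by a key that places timed spans
--     first (ordered by start_time) and untimed ones last, then take the head.
--     Stability makes ties resolve to the first occurrence, as A does."""
--     roots = [s for s in spans if s.get("parent_id") in (None, "")]
--
--     def key(s):
--         t = s.get("start_time") or ""
--         return "0" + t if t else "1"
--
--     ordered = sorted(roots, key=key)
--     return ordered[0] if ordered else None
-- ===== Notes on version B (the rewrite author's own statement) =====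
-- stated objective: alternative
-- what changed: Replaces A's single-pass running-minimum accumulator loop by filter + stable sort on an encoded key ('0'+start_time for timed roots, '1' for untimed ones, so untimed roots sort last) and taking the head of the sorted list.
import Mathlib
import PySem

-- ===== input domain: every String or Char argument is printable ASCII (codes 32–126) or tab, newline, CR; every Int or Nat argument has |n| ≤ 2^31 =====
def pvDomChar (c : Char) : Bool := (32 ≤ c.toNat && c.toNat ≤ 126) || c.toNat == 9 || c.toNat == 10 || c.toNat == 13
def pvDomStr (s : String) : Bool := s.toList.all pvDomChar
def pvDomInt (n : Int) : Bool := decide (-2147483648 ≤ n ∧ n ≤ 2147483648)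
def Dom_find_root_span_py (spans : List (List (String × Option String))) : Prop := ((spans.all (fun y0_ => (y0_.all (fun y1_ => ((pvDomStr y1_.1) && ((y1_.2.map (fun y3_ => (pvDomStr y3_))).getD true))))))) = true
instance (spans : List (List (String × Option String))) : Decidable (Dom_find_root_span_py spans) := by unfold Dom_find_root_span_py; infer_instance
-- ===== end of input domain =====

-- B replaces A's single-pass running-minimum loop by filter + stable sort on an encoded key
-- ('0'+start_time for timed roots, '1' for untimed ones) and taking the head; objective: alternative.

-- Shared accessors (span.get(k): a dict value may itself be None, hence the .join;
-- `s.get("start_time") or ""` maps both a missing key and None/"" values to "").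
def pvGet (s : List (String × Option String)) (k : String) : Option String :=
  (s.lookup k).join

def pvIsRoot (s : List (String × Option String)) : Bool :=
  -- pid is None or pid == ""
  match pvGet s "parent_id" with
  | none => true
  | some p => p == ""

def pvTime (s : List (String × Option String)) : String :=
  (pvGet s "start_time").getD ""

-- ===== PORT A =====
def find_root_span_py (spans : List (List (String × Option String))) : Option (List (String × Option String)) :=
  spans.foldl
    (fun root s =>
      if pvIsRoot s then
        match root with
        | none => some s
        | some r =>
          let s_time := pvTime s
          let root_time := pvTime r
          -- str '<' is Python's code-point lexicographic order: ported as List '<' on .toList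
          if s_time ≠ "" ∧ (root_time = "" ∨ s_time.toList < root_time.toList) then some s
          else some r
      else root)
    none

-- ===== PORT B =====
-- Source B's sort key: "0" + t if t else "1", as a List Char (Python's str order = code-point lex)
def pvKeyB (s : List (String × Option String)) : List Char :=
  let t := pvTime s
  if t ≠ "" then '0' :: t.toList else ['1']

def find_root_span_py_alt (spans : List (List (String × Option String))) : Option (List (String × Option String)) :=
  let roots := spans.filter pvIsRoot
  let ordered := PySem.List.sorted roots pvKeyB false
  ordered.head?

-- ===== PRECONDITION & SPEC =====
def Spec_find_root_span_py (spans : List (List (String × Option String))) (out : Option (List (String × Option String))) : Prop := out = find_root_span_py_alt spans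
instance (spans : List (List (String × Option String))) (out : Option (List (String × Option String))) : Decidable (Spec_find_root_span_py spans out) := by unfold Spec_find_root_span_py; infer_instance

-- ===== CLAIM (what is proved, stated in full; the proofs are below) =====
def Claim_equal_find_root_span_py : Prop := ∀ (spans : List (List (String × Option String))), Dom_find_root_span_py spans → Spec_find_root_span_py spans (find_root_span_py spans)

-- ===== LEMMAS AND PROOFS =====

-- A's inner step, restricted to root spans
def pvStep (root : Option (List (String × Option String))) (s : List (String × Option String)) :
    Option (List (String × Option String)) :=
  match root with
  | none => some s
  | some r =>
    if pvTime s ≠ "" ∧ (pvTime r = "" ∨ (pvTime s).toList < (pvTime r).toList) then some s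
    else some r

-- the head of B's running insertion sort: a strict running minimum under pvKeyB
def pvStepK (root : Option (List (String × Option String))) (s : List (String × Option String)) :
    Option (List (String × Option String)) :=
  match root with
  | none => some s
  | some r => if pvKeyB s < pvKeyB r then some s else some r

-- A's replace condition IS strict key order under pvKeyB
theorem pvStep_eq_pvStepK : pvStep = pvStepK := by
  funext root s
  cases root with
  | none => rfl
  | some r =>
    simp only [pvStep, pvStepK, pvKeyB]
    by_cases hs : pvTime s = ""
    · by_cases hr : pvTime r = "" <;>
        simp [hs, hr, List.cons_lt_cons_iff]
    · by_cases hr : pvTime r = ""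
      · have : ('0' :: (pvTime s).toList < ['1']) := by
          rw [List.cons_lt_cons_iff]; left; decide
        simp [hs, hr, this]
      · simp [hs, hr]

-- the head of insertBy-with-strict-< is one pvStepK step
theorem pvHead_insertBy (x : List (String × Option String))
    (ys : List (List (String × Option String))) :
    (PySem.List.insertBy (fun a b => decide (pvKeyB a < pvKeyB b)) x ys).head?
      = pvStepK ys.head? x := by
  cases ys with
  | nil => rfl
  | cons y t =>
    simp only [PySem.List.insertBy, pvStepK, List.head?_cons]
    by_cases h : pvKeyB x < pvKeyB y <;> simp [h]

-- head of B's insertion-sort fold = A's running-minimum fold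
theorem pvHead_foldl_insertBy (rs : List (List (String × Option String)))
    (acc : List (List (String × Option String))) :
    (rs.foldl (fun a x => PySem.List.insertBy (fun a b => decide (pvKeyB a < pvKeyB b)) x a) acc).head?
      = rs.foldl pvStepK acc.head? := by
  induction rs generalizing acc with
  | nil => rfl
  | cons s t ih =>
    simp only [List.foldl_cons]
    rw [ih, pvHead_insertBy]

-- A's guarded fold over spans = the plain fold over the root spans
theorem pvA_eq_fold_filter (spans : List (List (String × Option String))) :
    ∀ acc, spans.foldl
      (fun root s =>
        if pvIsRoot s then
          match root with
          | none => some s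
          | some r =>
            let s_time := pvTime s
            let root_time := pvTime r
            if s_time ≠ "" ∧ (root_time = "" ∨ s_time.toList < root_time.toList) then some s
            else some r
        else root) acc
      = (spans.filter pvIsRoot).foldl pvStep acc := by
  induction spans with
  | nil => intro acc; rfl
  | cons s ss ih =>
    intro acc
    simp only [List.foldl_cons, List.filter_cons]
    by_cases h : pvIsRoot s
    · simp only [h, ite_true, List.foldl_cons]
      rw [ih]
      rfl
    · simp only [h, Bool.false_eq_true, ite_false]
      exact ih acc

theorem pvAlt_eq_fold (spans : List (List (String × Option String))) :
    find_root_span_py_alt spans = (spans.filter pvIsRoot).foldl pvStepK none := by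
  show (PySem.List.sorted (spans.filter pvIsRoot) pvKeyB false).head? = _
  rw [PySem.List.sorted_eq_foldl_insertBy]
  exact pvHead_foldl_insertBy _ []

-- ===== VERDICT (by name: the statement is the Claim_ definition above) =====
theorem find_root_span_py_spec : Claim_equal_find_root_span_py := by
  intro spans _
  unfold Spec_find_root_span_py find_root_span_py
  rw [pvA_eq_fold_filter, pvStep_eq_pvStepK, pvAlt_eq_fold]
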